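-- pv_equiv track=rewrite | github.com/GitHub4LP/mlir_test | backend/mlir_utils/lowering.py | find_reachable_to_llvm
-- ===== SOURCE A (Python) =====
-- from typing import Dict, Set, List
-- from collections import defaultdict
--
-- TERMINAL_DIALECTS = {
--     "llvm",      # LLVM IR
--     "rocdl",     # AMD ROCm
--     "nvvm",      # NVIDIA PTX
--     "spirv",     # SPIR-V
--     "emitc",     # C 代码生成
--     "amx",       # Intel AMX
--     "std",       # 旧方言名（已废弃）
--     "standard",  # 同上
-- }
--
-- KEEP_AS_SOURCE = {"nvvm", "spirv"}
--
-- def find_reachable_to_llvm(graph: Dict[str, Dict[str, List[str]]]) -> Set[str]: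
--     """BFS 找出所有能到达终点方言的节点"""
--     reverse = defaultdict(set)
--     for src, dst_passes in graph.items():
--         for dst in dst_passes.keys():
--             reverse[dst].add(src)
--
--     reachable = set(TERMINAL_DIALECTS)
--     queue = list(TERMINAL_DIALECTS)
--     while queue:
--         cur = queue.pop(0)
--         for src in reverse.get(cur, []):
--             if src not in reachable:
--                 reachable.add(src)
--                 queue.append(src)
--
--     return reachable - (TERMINAL_DIALECTS - KEEP_AS_SOURCE)
-- ===== SOURCE B (Python) =====
-- TERMINAL_DIALECTS = {
--     "llvm", "rocdl", "nvvm", "spirv", "emitc", "amx", "std", "standard",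
-- }
--
-- KEEP_AS_SOURCE = {"nvvm", "spirv"}
--
-- def find_reachable_to_llvm(graph):
--     """Fixpoint by repeated forward sweeps: no reverse index, no BFS queue."""
--     reachable = set(TERMINAL_DIALECTS)
--     changed = True
--     while changed:
--         changed = False
--         for src, dst_passes in graph.items():
--             if src not in reachable and any(dst in reachable for dst in dst_passes):
--                 reachable.add(src)
--                 changed = True
--     return reachable - (TERMINAL_DIALECTS - KEEP_AS_SOURCE)
-- ===== Notes on version B (the rewrite author's own statement) =====
-- stated objective: alternative
-- what changed: Replaces A's reverse-adjacency index plus BFS queue with repeated forward sweeps of the forward graph to a fixpoint (no reverse index, no queue), keeping the identical final subtraction.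
import Mathlib
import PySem

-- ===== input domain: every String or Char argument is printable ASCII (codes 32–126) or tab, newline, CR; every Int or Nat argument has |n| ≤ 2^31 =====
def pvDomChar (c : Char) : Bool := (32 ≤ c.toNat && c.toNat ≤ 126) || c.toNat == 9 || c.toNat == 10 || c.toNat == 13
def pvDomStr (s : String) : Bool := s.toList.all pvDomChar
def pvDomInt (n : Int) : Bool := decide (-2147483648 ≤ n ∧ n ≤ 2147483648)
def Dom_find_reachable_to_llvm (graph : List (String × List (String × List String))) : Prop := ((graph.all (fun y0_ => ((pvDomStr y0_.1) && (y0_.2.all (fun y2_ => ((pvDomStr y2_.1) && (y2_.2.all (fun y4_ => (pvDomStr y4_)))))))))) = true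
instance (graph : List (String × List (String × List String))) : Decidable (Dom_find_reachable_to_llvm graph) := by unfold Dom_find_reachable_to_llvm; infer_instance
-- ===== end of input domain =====

-- B replaces A's reverse-adjacency index + BFS queue by repeated forward sweeps of the
-- graph to a fixpoint (objective: alternative algorithm, same result set).
-- Both ports render the RETURNED SET in sorted order: Python specifies no iteration
-- order for a set, and outputs of this function are compared as sets.

-- ===== PORT A =====
-- shared module constants: the set literals TERMINAL_DIALECTS and KEEP_AS_SOURCE, in source order
def pvTerminals : List String := ["llvm", "rocdl", "nvvm", "spirv", "emitc", "amx", "std", "standard"]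
def pvKeep : List String := ["nvvm", "spirv"]

-- shared: the dict argument's item list (duplicate keys overwrite in place, exactly as Python dict construction does)
def pvItems (graph : List (String × List (String × List String))) : List (String × List (String × List String)) :=
  (graph.foldl (fun d p => d.insert p.1 p.2) PySem.Dict.empty).items

-- A's `while queue:` BFS loop; the number of pops never exceeds len(initial queue) + len(items)
-- (proved in pvBfs_spec below), so that number is used as fuel
def pvBfs (rev : PySem.Dict String (PySem.Set String)) : Nat → PySem.Set String → List String → PySem.Set String
  | 0, reachable, _ => reachable
  | _ + 1, reachable, [] => reachable
  | fuel + 1, reachable, cur :: rest =>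
      let st := (rev.getD cur PySem.Set.empty).foldl
        (fun (st : PySem.Set String × List String) src =>
          if st.1.contains src then st else (st.1.add src, st.2 ++ [src]))
        (reachable, rest)
      pvBfs rev fuel st.1 st.2

def find_reachable_to_llvm (graph : List (String × List (String × List String))) : List String :=
  let items := pvItems graph
  let rev : PySem.Dict String (PySem.Set String) :=
    items.foldl (fun d p => p.2.foldl (fun d q => d.insert q.1 ((d.getD q.1 PySem.Set.empty).add p.1)) d) PySem.Dict.empty
  let reachable := pvBfs rev (pvTerminals.length + items.length) (PySem.Set.ofList pvTerminals) pvTerminals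
  PySem.List.sorted (reachable.diff ((PySem.Set.ofList pvTerminals).diff (PySem.Set.ofList pvKeep))) (fun x => x)

-- ===== PORT B =====
-- one pass of B's `for src, dst_passes in graph.items():` sweep
def pvSweep (items : List (String × List (String × List String))) (reachable : PySem.Set String) : PySem.Set String :=
  items.foldl (fun r p => if !r.contains p.1 && p.2.any (fun q => r.contains q.1) then r.add p.1 else r) reachable

-- B's `while changed:` loop; len(items) + 1 sweeps always reach the fixpoint (proved in pvSweeps_spec below)
def pvSweeps (items : List (String × List (String × List String))) : Nat → PySem.Set String → PySem.Set String
  | 0, r => r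
  | n + 1, r => let r' := pvSweep items r; if r' = r then r else pvSweeps items n r'

def find_reachable_to_llvm_alt (graph : List (String × List (String × List String))) : List String :=
  let items := pvItems graph
  let reachable := pvSweeps items (items.length + 1) (PySem.Set.ofList pvTerminals)
  PySem.List.sorted (reachable.diff ((PySem.Set.ofList pvTerminals).diff (PySem.Set.ofList pvKeep))) (fun x => x)

-- ===== PRECONDITION & SPEC =====
def Spec_find_reachable_to_llvm (graph : List (String × List (String × List String))) (out : List String) : Prop := out = find_reachable_to_llvm_alt graph
instance (graph : List (String × List (String × List String))) (out : List String) : Decidable (Spec_find_reachable_to_llvm graph out) := by unfold Spec_find_reachable_to_llvm; infer_instance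

-- ===== CLAIM (what is proved, stated in full; the proofs are below) =====
def Claim_equal_find_reachable_to_llvm : Prop := ∀ (graph : List (String × List (String × List String))), Dom_find_reachable_to_llvm graph → Spec_find_reachable_to_llvm graph (find_reachable_to_llvm graph)

-- ===== LEMMAS AND PROOFS =====

-- reachability to the terminal set along forward edges of an item list
inductive pvReach (G : List (String × List (String × List String))) : String → Prop
  | base {x : String} : x ∈ pvTerminals → pvReach G x
  | step {src : String} {dsts : List (String × List String)} {d : String} :
      (src, dsts) ∈ G → d ∈ dsts.map Prod.fst → pvReach G d → pvReach G src

-- the distinct source names of an item list, as a set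
def pvSrcs (G : List (String × List (String × List String))) : PySem.Set String :=
  PySem.Set.ofList (G.map Prod.fst)

theorem pvFoldlAdd_length_le (xs : List String) : ∀ (s : PySem.Set String),
    (xs.foldl PySem.Set.add s).length ≤ s.length + xs.length := by
  induction xs with
  | nil => intro s; simp
  | cons x t ih =>
    intro s
    have h1 : (PySem.Set.add s x).length ≤ s.length + 1 := by
      unfold PySem.Set.add; split <;> simp
    have h2 := ih (PySem.Set.add s x)
    simp only [List.foldl_cons, List.length_cons]
    omega

theorem pvOfList_length_le (xs : List String) :
    (PySem.Set.ofList xs).length ≤ xs.length := by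
  have := pvFoldlAdd_length_le xs PySem.Set.empty
  simpa [PySem.Set.empty] using this

theorem pvDiff_snoc_length (s r : List String) (a : String) (hs : s.Nodup) (ha : a ∈ s)
    (har : a ∉ r) : (PySem.Set.diff s (r ++ [a])).length + 1 = (PySem.Set.diff s r).length := by
  induction s with
  | nil => simp at ha
  | cons x t ih =>
    simp only [List.nodup_cons] at hs
    simp only [PySem.Set.diff] at ih ⊢
    by_cases hxa : x = a
    · subst hxa
      have hxt : x ∉ t := hs.1
      have hcongr : (t.filter (fun y => !decide (y ∈ r) && !decide (y = x))) = (t.filter (fun y => !decide (y ∈ r))) := by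
        apply List.filter_congr
        intro y hy
        have hyx : y ≠ x := fun he => hxt (he ▸ hy)
        simp [hyx]
      simp [har, hcongr]
    · have hat : a ∈ t := by
        rcases List.mem_cons.mp ha with h | h
        · exact absurd h.symm hxa
        · exact h
      have h2 := ih hs.2 hat
      by_cases hxr : x ∈ r
      · simpa [hxr] using h2
      · simp [hxr, hxa] at h2 ⊢
        omega

theorem pvDiff_append_length (s A : List String) (hs : s.Nodup) : ∀ (r : List String),
    A.Nodup → (∀ a ∈ A, a ∈ s) → (∀ a ∈ A, a ∉ r) →
    (PySem.Set.diff s (r ++ A)).length + A.length ≤ (PySem.Set.diff s r).length := by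
  induction A with
  | nil => intro r _ _ _; simp
  | cons a A ih =>
    intro r hnd hAs hAr
    simp only [List.nodup_cons] at hnd
    have h1 : r ++ a :: A = (r ++ [a]) ++ A := by simp
    have h2 := ih (r ++ [a]) hnd.2 (fun x hx => hAs x (List.mem_cons_of_mem _ hx))
      (fun x hx => by
        intro hmem
        rcases List.mem_append.mp hmem with h | h
        · exact hAr x (List.mem_cons_of_mem _ hx) h
        · simp at h
          exact hnd.1 (h ▸ hx))
    have h3 := pvDiff_snoc_length s r a hs (hAs a (List.mem_cons_self)) (hAr a (List.mem_cons_self))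
    rw [h1]
    simp only [List.length_cons]
    omega

-- the reverse dict built by A's first loop: src ∈ rev[dst] iff some item (src, dsts) has dst among its keys
def pvRev (G : List (String × List (String × List String))) : PySem.Dict String (PySem.Set String) :=
  G.foldl (fun d p => p.2.foldl (fun d q => d.insert q.1 ((d.getD q.1 PySem.Set.empty).add p.1)) d) PySem.Dict.empty

theorem pvRevInner (s0 : String) (l : List (String × List String)) :
    ∀ (d : PySem.Dict String (PySem.Set String)) (dst src : String),
    src ∈ (l.foldl (fun d q => d.insert q.1 ((d.getD q.1 PySem.Set.empty).add s0)) d).getD dst PySem.Set.empty ↔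
      src ∈ d.getD dst PySem.Set.empty ∨ (src = s0 ∧ dst ∈ l.map Prod.fst) := by
  induction l with
  | nil => intro d dst src; simp
  | cons q t ih =>
    intro d dst src
    rw [List.foldl_cons, ih]
    rw [PySem.Dict.getD_insert]
    by_cases hdq : dst = q.1
    · simp [hdq, PySem.Set.mem_add]
      tauto
    · simp [hdq]

theorem pvRevOuter (G : List (String × List (String × List String))) :
    ∀ (d : PySem.Dict String (PySem.Set String)) (dst src : String),
    src ∈ (G.foldl (fun d p => p.2.foldl (fun d q => d.insert q.1 ((d.getD q.1 PySem.Set.empty).add p.1)) d) d).getD dst PySem.Set.empty ↔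
      src ∈ d.getD dst PySem.Set.empty ∨ ∃ p ∈ G, p.1 = src ∧ dst ∈ p.2.map Prod.fst := by
  induction G with
  | nil => intro d dst src; simp
  | cons p t ih =>
    intro d dst src
    rw [List.foldl_cons, ih, pvRevInner]
    simp
    tauto

theorem pvRev_mem (G : List (String × List (String × List String))) (dst src : String) :
    src ∈ (pvRev G).getD dst PySem.Set.empty ↔ ∃ p ∈ G, p.1 = src ∧ dst ∈ p.2.map Prod.fst := by
  rw [pvRev, pvRevOuter]
  simp [PySem.Dict.getD, PySem.Dict.get?_empty, PySem.Set.empty]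

-- A's inner `for src in reverse.get(cur, []):` fold appends the same fresh elements to reachable and queue
theorem pvFold_facts (l : List String) : ∀ (r : PySem.Set String) (q : List String),
    ∃ A, (l.foldl (fun (st : PySem.Set String × List String) src =>
        if st.1.contains src then st else (st.1.add src, st.2 ++ [src])) (r, q)) = (r ++ A, q ++ A) ∧
      (∀ a ∈ A, a ∈ l) ∧ (∀ x ∈ l, x ∈ r ++ A) ∧ (r.Nodup → (r ++ A).Nodup) := by
  induction l with
  | nil => intro r q; exact ⟨[], by simp⟩
  | cons x t ih =>
    intro r q
    by_cases hc : r.contains x = true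
    · have hxr : x ∈ r := by simpa [PySem.Set.contains, List.contains_eq_mem] using hc
      obtain ⟨A, heq, hAl, hlin, hnd⟩ := ih r q
      refine ⟨A, ?_, ?_, ?_, hnd⟩
      · simpa [List.foldl_cons, hxr] using heq
      · exact fun a ha => List.mem_cons_of_mem _ (hAl a ha)
      · intro y hy
        rcases List.mem_cons.mp hy with h | h
        · exact h ▸ List.mem_append_left _ hxr
        · exact hlin y h
    · have hxr : x ∉ r := by simpa [PySem.Set.contains, List.contains_eq_mem] using hc
      obtain ⟨A, heq, hAl, hlin, hnd⟩ := ih (r ++ [x]) (q ++ [x])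
      refine ⟨x :: A, ?_, ?_, ?_, ?_⟩
      · have h3 := heq
        simp only [List.append_assoc, List.singleton_append] at h3
        simpa [List.foldl_cons, PySem.Set.add, hxr] using h3
      · intro a ha
        rcases List.mem_cons.mp ha with h | h
        · exact h ▸ List.mem_cons_self
        · exact List.mem_cons_of_mem _ (hAl a h)
      · intro y hy
        rcases List.mem_cons.mp hy with h | h
        · subst h; simp
        · have := hlin y h
          simpa [List.mem_append, List.mem_cons, or_assoc] using this
      · intro hr
        have hrx : (r ++ [x]).Nodup := by
          simp [List.nodup_append]
          exact ⟨hr, fun a ha he => hxr (he ▸ ha)⟩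
        have := hnd hrx
        simpa using this

theorem pvBfs_spec (G : List (String × List (String × List String))) :
    ∀ (fuel : Nat) (r : PySem.Set String) (q : List String),
    r.Nodup →
    (∀ x ∈ q, x ∈ r) →
    (∀ x ∈ r, x ∉ q → ∀ s ∈ (pvRev G).getD x PySem.Set.empty, s ∈ r) →
    q.length + (PySem.Set.diff (pvSrcs G) r).length ≤ fuel →
    (∀ x ∈ r, x ∈ pvBfs (pvRev G) fuel r q) ∧
    (pvBfs (pvRev G) fuel r q).Nodup ∧
    ((∀ x ∈ r, pvReach G x) → ∀ x ∈ pvBfs (pvRev G) fuel r q, pvReach G x) ∧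
    (∀ x ∈ pvBfs (pvRev G) fuel r q, ∀ s ∈ (pvRev G).getD x PySem.Set.empty, s ∈ pvBfs (pvRev G) fuel r q) := by
  intro fuel
  induction fuel with
  | zero =>
    intro r q hnd hql hinv hfuel
    have hq : q = [] := List.eq_nil_of_length_eq_zero (by omega)
    subst hq
    simp only [pvBfs]
    exact ⟨fun x hx => hx, hnd, fun h x hx => h x hx, fun x hx s hs => hinv x hx (by simp) s hs⟩
  | succ fuel ih =>
    intro r q hnd hql hinv hfuel
    match q with
    | [] =>
      simp only [pvBfs]
      exact ⟨fun x hx => hx, hnd, fun h x hx => h x hx, fun x hx s hs => hinv x hx (by simp) s hs⟩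
    | cur :: rest =>
      obtain ⟨A, heq, hAl, hlin, hndA⟩ := pvFold_facts ((pvRev G).getD cur PySem.Set.empty) r rest
      have hstep : pvBfs (pvRev G) (fuel+1) r (cur :: rest) = pvBfs (pvRev G) fuel (r ++ A) (rest ++ A) := by
        simp only [pvBfs]
        rw [heq]
      have hndRA : (r ++ A).Nodup := hndA hnd
      have hdisj : A.Nodup ∧ ∀ a ∈ A, a ∉ r := by
        rw [List.nodup_append] at hndRA
        exact ⟨hndRA.2.1, fun a ha har => hndRA.2.2 a har a ha rfl⟩
      have hsrc : ∀ s' ∈ (pvRev G).getD cur PySem.Set.empty, s' ∈ pvSrcs G := by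
        intro s' hs'
        obtain ⟨p, hpG, hp1, _⟩ := (pvRev_mem G cur s').mp hs'
        exact (PySem.Set.mem_ofList _ _).mpr (List.mem_map.mpr ⟨p, hpG, hp1⟩)
      have hql' : ∀ y ∈ rest ++ A, y ∈ r ++ A := by
        intro y hy
        rcases List.mem_append.mp hy with h | h
        · exact List.mem_append_left _ (hql y (List.mem_cons_of_mem _ h))
        · exact List.mem_append_right _ h
      have hinv' : ∀ x ∈ r ++ A, x ∉ rest ++ A → ∀ s ∈ (pvRev G).getD x PySem.Set.empty, s ∈ r ++ A := by
        intro x hx hnx s hs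
        rcases List.mem_append.mp hx with hxr | hxA
        · by_cases hxc : x = cur
          · exact hlin s (hxc ▸ hs)
          · have hxq : x ∉ cur :: rest := by
              intro hmem
              rcases List.mem_cons.mp hmem with h | h
              · exact hxc h
              · exact hnx (List.mem_append_left _ h)
            exact List.mem_append_left _ (hinv x hxr hxq s hs)
        · exact absurd (List.mem_append_right rest hxA) hnx
      have hfuel' : (rest ++ A).length + (PySem.Set.diff (pvSrcs G) (r ++ A)).length ≤ fuel := by
        have hdd := pvDiff_append_length (pvSrcs G) A (PySem.Set.nodup_ofList _) r hdisj.1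
          (fun a ha => hsrc a (hAl a ha)) hdisj.2
        simp only [List.length_append, List.length_cons] at hfuel ⊢
        omega
      obtain ⟨h1, h2, h3, h4⟩ := ih (r ++ A) (rest ++ A) hndRA hql' hinv' hfuel'
      rw [hstep]
      refine ⟨fun x hx => h1 x (List.mem_append_left _ hx), h2, ?_, h4⟩
      intro hr x hx
      refine h3 ?_ x hx
      intro y hy
      rcases List.mem_append.mp hy with h | h
      · exact hr y h
      · obtain ⟨p, hpG, hp1, hcur⟩ := (pvRev_mem G cur y).mp (hAl y h)
        have hcurR : pvReach G cur := hr cur (hql cur List.mem_cons_self)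
        have hpair : (y, p.2) = p := by rw [← hp1]
        exact pvReach.step (hpair ▸ hpG) hcur hcurR

-- the sweep fold: monotone, sound, and fires on every item whose cond already holds at entry
theorem pvSweepFold_facts (G : List (String × List (String × List String))) :
    ∀ (l : List (String × List (String × List String))), (∀ p ∈ l, p ∈ G) →
    ∀ (r : PySem.Set String),
    ∃ A, (l.foldl (fun r p => if !r.contains p.1 && p.2.any (fun q => r.contains q.1) then r.add p.1 else r) r) = r ++ A ∧
      (∀ a ∈ A, a ∈ l.map Prod.fst) ∧ (r.Nodup → (r ++ A).Nodup) ∧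
      ((∀ x ∈ r, pvReach G x) → ∀ x ∈ r ++ A, pvReach G x) ∧
      (∀ p ∈ l, (∃ q ∈ p.2, q.1 ∈ r) → p.1 ∈ r ++ A) := by
  intro l
  induction l with
  | nil =>
    intro _ r
    exact ⟨[], by simp, by simp, fun h => by simpa using h, fun h => by simpa using h, by simp⟩
  | cons p t ih =>
    intro hl r
    by_cases hc : (!r.contains p.1 && p.2.any fun q => r.contains q.1) = true
    · have hcc := hc
      rw [Bool.and_eq_true, Bool.not_eq_true'] at hcc
      have hpr : p.1 ∉ r := by
        simpa [PySem.Set.contains, List.contains_eq_mem] using hcc.1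
      have hex : ∃ q ∈ p.2, q.1 ∈ r := by
        rw [List.any_eq_true] at hcc
        obtain ⟨q, hq, hqr⟩ := hcc.2
        exact ⟨q, hq, by simpa [PySem.Set.contains, List.contains_eq_mem] using hqr⟩
      have hstep : (if (!r.contains p.1 && p.2.any fun q => r.contains q.1) = true then PySem.Set.add r p.1 else r) = r ++ [p.1] := by
        rw [if_pos hc]
        simp [PySem.Set.add, hpr]
      obtain ⟨A, heq, hAm, hnd, hsound, hfire⟩ := ih (fun p' hp' => hl p' (List.mem_cons_of_mem _ hp')) (r ++ [p.1])
      have hpReach : (∀ x ∈ r, pvReach G x) → pvReach G p.1 := by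
        intro hr
        obtain ⟨q, hq, hqr⟩ := hex
        have hpair : (p.1, p.2) = p := rfl
        exact pvReach.step (hpair ▸ hl p List.mem_cons_self) (List.mem_map.mpr ⟨q, hq, rfl⟩) (hr q.1 hqr)
      refine ⟨p.1 :: A, ?_, ?_, ?_, ?_, ?_⟩
      · rw [List.foldl_cons, hstep, heq]
        simp
      · intro a ha
        rcases List.mem_cons.mp ha with h | h
        · exact h ▸ List.mem_map.mpr ⟨p, List.mem_cons_self, rfl⟩
        · simp only [List.map_cons]
          exact List.mem_cons_of_mem _ (hAm a h)
      · intro hr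
        have h1 : (r ++ [p.1]).Nodup := by
          rw [List.nodup_append]
          refine ⟨hr, List.nodup_singleton _, fun a ha b hb hab => ?_⟩
          simp only [List.mem_singleton] at hb
          exact hpr (by rw [← hb, ← hab]; exact ha)
        have := hnd h1
        simpa using this
      · intro hr x hx
        refine hsound ?_ x (by simpa using hx)
        intro y hy
        rcases List.mem_append.mp hy with h | h
        · exact hr y h
        · exact (by simpa using h : y = p.1) ▸ hpReach hr
      · intro p' hp' hexr
        rcases List.mem_cons.mp hp' with h | h
        · subst h
          have : p'.1 ∈ r ++ [p'.1] := by simp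
          have h2 := List.mem_append_left A this
          simp only [List.append_assoc, List.singleton_append] at h2
          exact h2
        · have h2 := hfire p' h (by
            obtain ⟨q, hq, hqr⟩ := hexr
            exact ⟨q, hq, List.mem_append_left _ hqr⟩)
          simpa using h2
    · have hstep : (if (!r.contains p.1 && p.2.any fun q => r.contains q.1) = true then PySem.Set.add r p.1 else r) = r := by
        rw [if_neg hc]
      obtain ⟨A, heq, hAm, hnd, hsound, hfire⟩ := ih (fun p' hp' => hl p' (List.mem_cons_of_mem _ hp')) r
      refine ⟨A, ?_, ?_, hnd, hsound, ?_⟩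
      · rw [List.foldl_cons, hstep, heq]
      · intro a ha
        simp only [List.map_cons]
        exact List.mem_cons_of_mem _ (hAm a ha)
      · intro p' hp' hexr
        rcases List.mem_cons.mp hp' with h | h
        · subst h
          by_cases hcont : p'.1 ∈ r
          · exact List.mem_append_left _ hcont
          · exfalso
            apply hc
            rw [Bool.and_eq_true, Bool.not_eq_true']
            constructor
            · simpa [PySem.Set.contains, List.contains_eq_mem] using hcont
            · rw [List.any_eq_true]
              obtain ⟨q, hq, hqr⟩ := hexr
              exact ⟨q, hq, by simpa [PySem.Set.contains, List.contains_eq_mem] using hqr⟩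
        · exact hfire p' h hexr

theorem pvSweeps_spec (G : List (String × List (String × List String))) :
    ∀ (n : Nat) (r : PySem.Set String), r.Nodup →
    (PySem.Set.diff (pvSrcs G) r).length < n →
    (∀ x ∈ r, x ∈ pvSweeps G n r) ∧
    (pvSweeps G n r).Nodup ∧
    ((∀ x ∈ r, pvReach G x) → ∀ x ∈ pvSweeps G n r, pvReach G x) ∧
    pvSweep G (pvSweeps G n r) = pvSweeps G n r := by
  intro n
  induction n with
  | zero => intro r _ h; exact absurd h (Nat.not_lt_zero _)
  | succ n ih =>
    intro r hnd hlt
    by_cases h : pvSweep G r = r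
    · simp only [pvSweeps]
      rw [if_pos h]
      exact ⟨fun x hx => hx, hnd, fun hr x hx => hr x hx, h⟩
    · simp only [pvSweeps]
      rw [if_neg h]
      obtain ⟨A, heq, hAm, hndA, hsound, hfire⟩ := pvSweepFold_facts G G (fun p hp => hp) r
      have heq' : pvSweep G r = r ++ A := heq
      have hA : A ≠ [] := fun hA0 => h (by rw [heq', hA0]; simp)
      have hndRA : (r ++ A).Nodup := hndA hnd
      have hdisj : A.Nodup ∧ ∀ a ∈ A, a ∉ r := by
        rw [List.nodup_append] at hndRA
        exact ⟨hndRA.2.1, fun a ha har => hndRA.2.2 a har a ha rfl⟩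
      have hndRA' : (r ++ A).Nodup := hndA hnd
      have hlt' : (PySem.Set.diff (pvSrcs G) (r ++ A)).length < n := by
        have hdd := pvDiff_append_length (pvSrcs G) A (PySem.Set.nodup_ofList _) r hdisj.1
          (fun a ha => (PySem.Set.mem_ofList _ _).mpr (hAm a ha)) hdisj.2
        have hpos : 0 < A.length := List.length_pos_of_ne_nil hA
        omega
      obtain ⟨h1, h2, h3, h4⟩ := ih (r ++ A) hndRA' hlt'
      rw [heq']
      exact ⟨fun x hx => h1 x (List.mem_append_left _ hx), h2, fun hr => h3 (hsound hr), h4⟩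

-- ===== VERDICT (by name: the statement is the Claim_ definition above) =====
theorem find_reachable_to_llvm_spec : Claim_equal_find_reachable_to_llvm := by
  unfold Claim_equal_find_reachable_to_llvm
  intro graph _
  unfold Spec_find_reachable_to_llvm
  show PySem.List.sorted ((pvBfs (pvRev (pvItems graph)) (pvTerminals.length + (pvItems graph).length)
      (PySem.Set.ofList pvTerminals) pvTerminals).diff
      ((PySem.Set.ofList pvTerminals).diff (PySem.Set.ofList pvKeep))) (fun x => x) =
    PySem.List.sorted ((pvSweeps (pvItems graph) ((pvItems graph).length + 1)
      (PySem.Set.ofList pvTerminals)).diff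
      ((PySem.Set.ofList pvTerminals).diff (PySem.Set.ofList pvKeep))) (fun x => x)
  set G := pvItems graph with hG
  set R0 : PySem.Set String := PySem.Set.ofList pvTerminals with hR0
  have hnd0 : R0.Nodup := PySem.Set.nodup_ofList _
  have hdle : (PySem.Set.diff (pvSrcs G) R0).length ≤ G.length := by
    have h1 : (PySem.Set.diff (pvSrcs G) R0).length ≤ (pvSrcs G).length :=
      List.length_filter_le _ _
    have h2 : (pvSrcs G).length ≤ (G.map Prod.fst).length := pvOfList_length_le _
    simpa using le_trans h1 (by simpa using h2)
  obtain ⟨hsubA, hndA, hsoundA, hclosedA⟩ :=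
    pvBfs_spec G (pvTerminals.length + G.length) R0 pvTerminals hnd0
      (fun x hx => (PySem.Set.mem_ofList _ _).mpr hx)
      (fun x hx hnx => absurd ((PySem.Set.mem_ofList _ _).mp hx) hnx)
      (by omega)
  obtain ⟨hsubB, hndB, hsoundB, hfixB⟩ :=
    pvSweeps_spec G (G.length + 1) R0 hnd0 (by omega)
  set XA := pvBfs (pvRev G) (pvTerminals.length + G.length) R0 pvTerminals with hXA
  set XB := pvSweeps G (G.length + 1) R0 with hXB
  have hbase : ∀ x ∈ R0, pvReach G x :=
    fun x hx => pvReach.base ((PySem.Set.mem_ofList _ _).mp hx)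
  have hAr : ∀ x ∈ XA, pvReach G x := hsoundA hbase
  have hBr : ∀ x ∈ XB, pvReach G x := hsoundB hbase
  have hclosedB : ∀ p ∈ G, (∃ q ∈ p.2, q.1 ∈ XB) → p.1 ∈ XB := by
    intro p hp hex
    obtain ⟨A, heq, _, _, _, hfire⟩ := pvSweepFold_facts G G (fun p hp => hp) XB
    have heq' : pvSweep G XB = XB ++ A := heq
    have hAnil : A = [] := by
      have := hfixB
      rw [heq'] at this
      exact (List.append_right_eq_self.mp this)
    have := hfire p hp hex
    rw [hAnil] at this
    simpa using this
  have hRA : ∀ x, pvReach G x → x ∈ XA := by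
    intro x hx
    induction hx with
    | base h => exact hsubA _ ((PySem.Set.mem_ofList _ _).mpr h)
    | step hpG hd hr ihx =>
      exact hclosedA _ ihx _ ((pvRev_mem G _ _).mpr ⟨(_, _), hpG, rfl, hd⟩)
  have hRB : ∀ x, pvReach G x → x ∈ XB := by
    intro x hx
    induction hx with
    | base h => exact hsubB _ ((PySem.Set.mem_ofList _ _).mpr h)
    | step hpG hd hr ihx =>
      rename_i src dsts d
      obtain ⟨q, hq, hq1⟩ := List.mem_map.mp hd
      exact hclosedB (src, dsts) hpG ⟨q, hq, hq1 ▸ ihx⟩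
  have hiff : ∀ a : String, a ∈ XA ↔ a ∈ XB :=
    fun a => ⟨fun h => hRB a (hAr a h), fun h => hRA a (hBr a h)⟩
  have hperm : (XA.diff (R0.diff (PySem.Set.ofList pvKeep))).Perm
      (XB.diff (R0.diff (PySem.Set.ofList pvKeep))) := by
    have hiff2 : ∀ a : String, a ∈ XA.diff (R0.diff (PySem.Set.ofList pvKeep)) ↔
        a ∈ XB.diff (R0.diff (PySem.Set.ofList pvKeep)) := by
      intro a
      simp only [PySem.Set.mem_diff, hiff a]
    simp only [PySem.Set.diff] at hiff2 ⊢
    rw [List.perm_ext_iff_of_nodup (hndA.filter _) (hndB.filter _)]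
    exact hiff2
  exact PySem.List.sorted_eq_sorted_of_perm _ _ _ (fun a b hab => hab) hperm
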